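-- pv_equiv track=rewrite | github.com/juderozario08/PythonProjectsMAC | labQuizzes.py | RecursiveAndOrFlip
-- ===== SOURCE A (Python) =====
-- def RecursiveAndOrFlip(ls):
--     if len(ls) == 0:
--         return 0
--     if len(ls) == 1:
--         return not ls[0]
--     if len(ls) % 2 == 1:
--         return RecursiveAndOrFlip(ls[0:len(ls)//2 + 1]) and RecursiveAndOrFlip(ls[len(ls)//2 + 1:len(ls)])
--     return RecursiveAndOrFlip(ls[0:len(ls)//2]) or RecursiveAndOrFlip(ls[len(ls)//2: len(ls)])
-- ===== SOURCE B (Python) =====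
-- def RecursiveAndOrFlip(ls):
--     if len(ls) == 0:
--         return 0
--     # explicit work stack of tasks over index ranges, evaluated post-order
--     tasks = [("eval", 0, len(ls))]
--     vals = []
--     while tasks:
--         t = tasks.pop()
--         if t[0] == "eval":
--             lo, hi = t[1], t[2]
--             s = hi - lo
--             if s <= 1:
--                 vals.append(not ls[lo])
--             else:
--                 mid = lo + s // 2 + 1 if s % 2 == 1 else lo + s // 2
--                 tasks.append(("comb", s % 2 == 1))
--                 tasks.append(("eval", mid, hi))
--                 tasks.append(("eval", lo, mid))
--         else:
--             b = vals.pop()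
--             a = vals.pop()
--             vals.append((a and b) if t[1] else (a or b))
--     return vals[-1]
-- ===== Notes on version B (the rewrite author's own statement) =====
-- stated objective: alternative
-- what changed: Replaced A's recursive slicing of list copies with an iterative explicit work stack of (lo, hi) index ranges over the original list, evaluated post-order with a separate value stack.
-- outside the precondition, e.g. on RecursiveAndOrFlip([]): A returns 0, B returns 0
import Mathlib
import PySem

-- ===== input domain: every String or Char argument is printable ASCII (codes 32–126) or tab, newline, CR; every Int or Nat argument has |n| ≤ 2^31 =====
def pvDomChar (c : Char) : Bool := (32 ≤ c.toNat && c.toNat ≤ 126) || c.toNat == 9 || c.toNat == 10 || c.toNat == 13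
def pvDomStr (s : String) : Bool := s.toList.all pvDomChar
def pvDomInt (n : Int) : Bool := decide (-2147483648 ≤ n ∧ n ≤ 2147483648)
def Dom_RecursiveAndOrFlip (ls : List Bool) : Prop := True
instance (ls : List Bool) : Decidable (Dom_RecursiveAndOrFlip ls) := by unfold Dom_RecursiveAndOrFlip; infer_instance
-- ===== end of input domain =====

-- B replaces A's recursive list-slicing with an explicit post-order work stack of (lo, hi)
-- index ranges over the original list (objective: alternative decomposition, similar cost).
-- Pre_ excludes only the empty list, on which A returns the int 0 instead of a bool.


-- ===== PORT A =====
-- A's recursion, totalized by a fuel argument (structural on the fuel; fuel = ls.length is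
-- enough, since every recursive call is on a strictly shorter slice). ls[0] is in range
-- under the length-1 guard.
def pvAFuel : Nat → List Bool → Bool
  | 0, _ => false  -- fuel guard only; never reached from RecursiveAndOrFlip
  | f + 1, ls =>
    if ls.length = 0 then false  -- Python returns int 0 here (not a bool); excluded by Pre_
    else if ls.length = 1 then ! (PySem.List.pyGetD ls 0 false)
    else if (ls.length : Int) % 2 = 1 then
      pvAFuel f (PySem.List.slice ls (some 0) (some (PySem.Int.floordiv (ls.length : Int) 2 + 1))) &&
      pvAFuel f (PySem.List.slice ls (some (PySem.Int.floordiv (ls.length : Int) 2 + 1)) (some (ls.length : Int)))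
    else
      pvAFuel f (PySem.List.slice ls (some 0) (some (PySem.Int.floordiv (ls.length : Int) 2))) ||
      pvAFuel f (PySem.List.slice ls (some (PySem.Int.floordiv (ls.length : Int) 2)) (some (ls.length : Int)))

def RecursiveAndOrFlip (ls : List Bool) : Bool := pvAFuel ls.length ls

-- ===== PORT B =====
inductive PvTask
  | eval : Nat → Nat → PvTask
  | comb : Bool → PvTask
deriving DecidableEq, Repr

-- split point of the range [lo, hi): Source B's mid
def pvMid (lo hi : Nat) : Nat :=
  if (hi - lo) % 2 = 1 then lo + (hi - lo) / 2 + 1 else lo + (hi - lo) / 2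

-- the while loop of Source B: tasks is the work stack (head = top), vals the value stack;
-- the fuel bounds the number of loop iterations (3 * ls.length is enough)
def pvRunF (ls : List Bool) : Nat → List PvTask → List Bool → List Bool
  | 0, _, vals => vals  -- fuel guard only; never reached from RecursiveAndOrFlip_alt
  | _ + 1, [], vals => vals
  | f + 1, PvTask.comb op :: ts, vals =>
    match vals with
    | b :: a :: rest => pvRunF ls f ts ((if op then a && b else a || b) :: rest)
    | _ => vals  -- unreachable for the stacks Source B builds
  | f + 1, PvTask.eval lo hi :: ts, vals =>
    if hi - lo ≤ 1 then
      pvRunF ls f ts ((! ls.getD lo false) :: vals)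
    else
      pvRunF ls f (PvTask.eval lo (pvMid lo hi) :: PvTask.eval (pvMid lo hi) hi ::
        PvTask.comb (decide ((hi - lo) % 2 = 1)) :: ts) vals

def RecursiveAndOrFlip_alt (ls : List Bool) : Bool :=
  if ls.length = 0 then false  -- Source B returns int 0 here; excluded by Pre_
  else (pvRunF ls (3 * ls.length) [PvTask.eval 0 ls.length] []).headD false

-- ===== PRECONDITION & SPEC =====
-- Pre_ excludes exactly the empty list, on which both programs return the int 0, not a bool.
def Pre_RecursiveAndOrFlip (ls : List Bool) : Prop := ls ≠ []
instance (ls : List Bool) : Decidable (Pre_RecursiveAndOrFlip ls) := by unfold Pre_RecursiveAndOrFlip; infer_instance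
def pvWitness_RecursiveAndOrFlip : List Bool := [true, false, true]
def Spec_RecursiveAndOrFlip (ls : List Bool) (out : Bool) : Prop := out = RecursiveAndOrFlip_alt ls
instance (ls : List Bool) (out : Bool) : Decidable (Spec_RecursiveAndOrFlip ls out) := by unfold Spec_RecursiveAndOrFlip; infer_instance

-- ===== CLAIM (what is proved, stated in full; the proofs are below) =====
def Claim_equal_RecursiveAndOrFlip : Prop := ∀ (ls : List Bool), Dom_RecursiveAndOrFlip ls → Pre_RecursiveAndOrFlip ls → Spec_RecursiveAndOrFlip ls (RecursiveAndOrFlip ls)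

-- ===== LEMMAS AND PROOFS =====

theorem pv_floordiv_two (n : Nat) : PySem.Int.floordiv (n : Int) 2 = ((n / 2 : Nat) : Int) := by
  exact_mod_cast PySem.Int.floordiv_natCast n 2

theorem pv_cast_succ (n : Nat) : ((n : Int) + 1) = ((n + 1 : Nat) : Int) := by push_cast; ring

theorem pv_clampIdx_zero (n : Nat) : PySem.List.clampIdx n 0 = 0 := by
  simp [PySem.List.clampIdx]

theorem pvADecOdd1 (ls : List Bool) (h0 : ¬ ls.length = 0) (h1 : ¬ ls.length = 1)
    (hp : (ls.length : Int) % 2 = 1) :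
    (PySem.List.slice ls (some 0) (some (PySem.Int.floordiv (ls.length : Int) 2 + 1))).length < ls.length := by
  simp only [pv_floordiv_two, pv_cast_succ, PySem.List.length_slice,
    PySem.List.clampIdx_natCast, pv_clampIdx_zero, Nat.min_def, Nat.sub_zero]
  split_ifs <;> omega

theorem pvADecOdd2 (ls : List Bool) (h0 : ¬ ls.length = 0) (h1 : ¬ ls.length = 1)
    (hp : (ls.length : Int) % 2 = 1) :
    (PySem.List.slice ls (some (PySem.Int.floordiv (ls.length : Int) 2 + 1)) (some (ls.length : Int))).length < ls.length := by
  simp only [pv_floordiv_two, pv_cast_succ, PySem.List.length_slice,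
    PySem.List.clampIdx_natCast, pv_clampIdx_zero, Nat.min_def, Nat.sub_zero]
  split_ifs <;> omega

theorem pvADecEven1 (ls : List Bool) (h0 : ¬ ls.length = 0) (h1 : ¬ ls.length = 1)
    (hp : ¬ (ls.length : Int) % 2 = 1) :
    (PySem.List.slice ls (some 0) (some (PySem.Int.floordiv (ls.length : Int) 2))).length < ls.length := by
  simp only [pv_floordiv_two, PySem.List.length_slice,
    PySem.List.clampIdx_natCast, pv_clampIdx_zero, Nat.min_def, Nat.sub_zero]
  split_ifs <;> omega

theorem pvADecEven2 (ls : List Bool) (h0 : ¬ ls.length = 0) (h1 : ¬ ls.length = 1)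
    (hp : ¬ (ls.length : Int) % 2 = 1) :
    (PySem.List.slice ls (some (PySem.Int.floordiv (ls.length : Int) 2)) (some (ls.length : Int))).length < ls.length := by
  simp only [pv_floordiv_two, PySem.List.length_slice,
    PySem.List.clampIdx_natCast, pv_clampIdx_zero, Nat.min_def, Nat.sub_zero]
  split_ifs <;> omega

-- the fuel does not matter as long as it is at least ls.length
theorem pvAFuel_irrel : ∀ (n : Nat) (ls : List Bool) (f g : Nat),
    ls.length ≤ n → ls.length ≤ f → ls.length ≤ g → pvAFuel f ls = pvAFuel g ls := by
  intro n
  induction n using Nat.strong_induction_on with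
  | _ n ih =>
    intro ls f g hn hf hg
    by_cases h0 : ls.length = 0
    · have hz : ∀ k, pvAFuel k ls = false := by
        intro k
        cases k with
        | zero => rfl
        | succ k => rw [pvAFuel, if_pos h0]
      rw [hz, hz]
    · obtain ⟨f', rfl⟩ : ∃ f', f = f' + 1 := ⟨f - 1, by omega⟩
      obtain ⟨g', rfl⟩ : ∃ g', g = g' + 1 := ⟨g - 1, by omega⟩
      rw [pvAFuel, pvAFuel]
      by_cases h1 : ls.length = 1
      · rw [if_neg h0, if_neg h0, if_pos h1, if_pos h1]
      · rw [if_neg h0, if_neg h0, if_neg h1, if_neg h1]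
        by_cases hp : (ls.length : Int) % 2 = 1
        · rw [if_pos hp, if_pos hp]
          have d1 := pvADecOdd1 ls h0 h1 hp
          have d2 := pvADecOdd2 ls h0 h1 hp
          rw [ih (n - 1) (by omega) _ f' g' (by omega) (by omega) (by omega),
              ih (n - 1) (by omega) _ f' g' (by omega) (by omega) (by omega)]
        · rw [if_neg hp, if_neg hp]
          have d1 := pvADecEven1 ls h0 h1 hp
          have d2 := pvADecEven2 ls h0 h1 hp
          rw [ih (n - 1) (by omega) _ f' g' (by omega) (by omega) (by omega),
              ih (n - 1) (by omega) _ f' g' (by omega) (by omega) (by omega)]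

theorem pvA_eq (ls : List Bool) (f : Nat) (h : ls.length ≤ f) :
    pvAFuel f ls = RecursiveAndOrFlip ls :=
  pvAFuel_irrel ls.length ls f ls.length le_rfl h le_rfl

-- A on a one-element list is the flipped element
theorem pvA_single (b : Bool) : RecursiveAndOrFlip [b] = ! b := by
  rw [RecursiveAndOrFlip]
  show pvAFuel (0 + 1) [b] = ! b
  rw [pvAFuel]
  simp [PySem.List.pyGetD_zero_cons]

-- A's recursive split, phrased over index ranges of the enclosing list
theorem pvA_split (ls : List Bool) (lo s : Nat) (h2 : 2 ≤ s) (hlen : lo + s ≤ ls.length) :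
    RecursiveAndOrFlip (List.take s (List.drop lo ls)) =
      if s % 2 = 1 then
        RecursiveAndOrFlip (List.take (s / 2 + 1) (List.drop lo ls)) &&
        RecursiveAndOrFlip (List.take (s - (s / 2 + 1)) (List.drop (lo + (s / 2 + 1)) ls))
      else
        RecursiveAndOrFlip (List.take (s / 2) (List.drop lo ls)) ||
        RecursiveAndOrFlip (List.take (s - s / 2) (List.drop (lo + s / 2) ls)) := by
  have hlseg : (List.take s (List.drop lo ls)).length = s := by
    simp [List.length_take, List.length_drop]; omega
  have e1 : ∀ j : Nat, j ≤ s →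
      (List.take s (List.drop lo ls)).take j = List.take j (List.drop lo ls) := by
    intro j hj; rw [List.take_take]; congr 1; omega
  have e2 : ∀ j : Nat, ((List.take s (List.drop lo ls)).drop j).take (s - j) =
      List.take (s - j) (List.drop (lo + j) ls) := by
    intro j
    rw [List.drop_take, List.drop_drop, List.take_take, Nat.min_self]
  obtain ⟨t, rfl⟩ : ∃ t, s = t + 1 := ⟨s - 1, by omega⟩
  conv_lhs => rw [RecursiveAndOrFlip, hlseg]
  rw [pvAFuel]
  rw [hlseg, if_neg (by omega), if_neg (by omega), pv_floordiv_two, pv_cast_succ]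
  by_cases hpar : (t + 1) % 2 = 1
  · rw [if_pos (by omega : (((t + 1 : Nat) : Int)) % 2 = 1), if_pos hpar]
    simp only [PySem.List.slice_zero_start, PySem.List.slice_to_natCast,
      PySem.List.slice_natCast]
    rw [e1 ((t + 1) / 2 + 1) (by omega), e2 ((t + 1) / 2 + 1)]
    rw [pvA_eq (List.take ((t + 1) / 2 + 1) (List.drop lo ls)) t
          (by simp [List.length_take, List.length_drop] <;> omega)]
    rw [pvA_eq (List.take (t + 1 - ((t + 1) / 2 + 1)) (List.drop (lo + ((t + 1) / 2 + 1)) ls)) t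
          (by simp [List.length_take, List.length_drop] <;> omega)]
  · rw [if_neg (by omega : ¬ (((t + 1 : Nat) : Int)) % 2 = 1), if_neg hpar]
    simp only [PySem.List.slice_zero_start, PySem.List.slice_to_natCast,
      PySem.List.slice_natCast]
    rw [e1 ((t + 1) / 2) (by omega), e2 ((t + 1) / 2)]
    rw [pvA_eq (List.take ((t + 1) / 2) (List.drop lo ls)) t
          (by simp [List.length_take, List.length_drop] <;> omega)]
    rw [pvA_eq (List.take (t + 1 - (t + 1) / 2) (List.drop (lo + (t + 1) / 2) ls)) t
          (by simp [List.length_take, List.length_drop] <;> omega)]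

-- step lemmas for the loop
theorem pvRunF_nil (ls : List Bool) (f : Nat) (vals : List Bool) :
    pvRunF ls (f + 1) [] vals = vals := by
  rw [pvRunF]

theorem pvRunF_comb (ls : List Bool) (f : Nat) (op : Bool) (ts : List PvTask)
    (b a : Bool) (rest : List Bool) :
    pvRunF ls (f + 1) (PvTask.comb op :: ts) (b :: a :: rest) =
      pvRunF ls f ts ((if op then a && b else a || b) :: rest) := by
  rw [pvRunF]

theorem pvRunF_eval_small (ls : List Bool) (f lo hi : Nat) (ts : List PvTask) (vals : List Bool)
    (h : hi - lo ≤ 1) :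
    pvRunF ls (f + 1) (PvTask.eval lo hi :: ts) vals = pvRunF ls f ts ((! ls.getD lo false) :: vals) := by
  rw [pvRunF]; simp [h]

theorem pvRunF_eval_big (ls : List Bool) (f lo hi : Nat) (ts : List PvTask) (vals : List Bool)
    (h : ¬ hi - lo ≤ 1) :
    pvRunF ls (f + 1) (PvTask.eval lo hi :: ts) vals =
      pvRunF ls f (PvTask.eval lo (pvMid lo hi) :: PvTask.eval (pvMid lo hi) hi ::
        PvTask.comb (decide ((hi - lo) % 2 = 1)) :: ts) vals := by
  rw [pvRunF]; simp [h]

-- main invariant: with enough fuel, an eval task burns exactly 3*s - 2 steps and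
-- produces exactly A's value on the segment [lo, hi)
theorem pvRunF_eval_spec (ls : List Bool) :
    ∀ (s lo hi : Nat) (ts : List PvTask) (vals : List Bool) (f : Nat),
      hi - lo = s → 1 ≤ s → hi ≤ ls.length → 3 * s - 2 ≤ f →
      pvRunF ls f (PvTask.eval lo hi :: ts) vals =
        pvRunF ls (f - (3 * s - 2)) ts (RecursiveAndOrFlip ((ls.drop lo).take s) :: vals) := by
  intro s
  induction s using Nat.strong_induction_on with
  | _ s ih =>
    intro lo hi ts vals f hs h1 hlen hf
    by_cases hsmall : s ≤ 1
    · have hs1 : s = 1 := by omega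
      have hlo : lo < ls.length := by omega
      obtain ⟨f', rfl⟩ : ∃ f', f = f' + 1 := ⟨f - 1, by omega⟩
      rw [pvRunF_eval_small ls f' lo hi ts vals (by omega), hs1]
      have hseg : List.take 1 (List.drop lo ls) = [ls[lo]] := by
        apply List.ext_getElem
        · simp [List.length_take, List.length_drop]; omega
        · intro i hi1 hi2
          have : i = 0 := by simp at hi2; omega
          subst this
          simp [List.getElem_take, List.getElem_drop]
      rw [hseg, pvA_single, List.getD_eq_getElem ls false hlo]
      congr 1
    · have h2 : 2 ≤ s := by omega
      obtain ⟨f', rfl⟩ : ∃ f', f = f' + 1 := ⟨f - 1, by omega⟩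
      rw [pvRunF_eval_big ls f' lo hi ts vals (by omega), hs]
      by_cases hpar : s % 2 = 1
      · rw [show pvMid lo hi = lo + (s / 2 + 1) from by simp [pvMid, hs, hpar] <;> omega]
        simp only [hpar, decide_true]
        rw [ih (s / 2 + 1) (by omega) lo (lo + (s / 2 + 1)) _ vals f' (by omega) (by omega) (by omega) (by omega),
            ih (s - (s / 2 + 1)) (by omega) (lo + (s / 2 + 1)) hi _ _ _ (by omega) (by omega) (by omega) (by omega)]
        obtain ⟨f'', hf''⟩ : ∃ f'', f' - (3 * (s / 2 + 1) - 2) - (3 * (s - (s / 2 + 1)) - 2) = f'' + 1 :=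
          ⟨f' - (3 * (s / 2 + 1) - 2) - (3 * (s - (s / 2 + 1)) - 2) - 1, by omega⟩
        rw [hf'', pvRunF_comb]
        rw [pvA_split ls lo s h2 (by omega), if_pos hpar]
        have : f'' = f' + 1 - (3 * s - 2) := by omega
        rw [this]
        simp
      · rw [show pvMid lo hi = lo + s / 2 from by simp [pvMid, hs, hpar]]
        simp only [hpar, decide_false]
        rw [ih (s / 2) (by omega) lo (lo + s / 2) _ vals f' (by omega) (by omega) (by omega) (by omega),
            ih (s - s / 2) (by omega) (lo + s / 2) hi _ _ _ (by omega) (by omega) (by omega) (by omega)]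
        obtain ⟨f'', hf''⟩ : ∃ f'', f' - (3 * (s / 2) - 2) - (3 * (s - s / 2) - 2) = f'' + 1 :=
          ⟨f' - (3 * (s / 2) - 2) - (3 * (s - s / 2) - 2) - 1, by omega⟩
        rw [hf'', pvRunF_comb]
        rw [pvA_split ls lo s h2 (by omega), if_neg hpar]
        have : f'' = f' + 1 - (3 * s - 2) := by omega
        rw [this]
        simp

-- ===== VERDICT (by name: the statement is the Claim_ definition above) =====
theorem RecursiveAndOrFlip_spec : Claim_equal_RecursiveAndOrFlip := by
  intro ls _ hpre
  unfold Spec_RecursiveAndOrFlip RecursiveAndOrFlip_alt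
  have hne : ls.length ≠ 0 := by simpa [List.length_eq_zero_iff] using hpre
  rw [if_neg hne,
      pvRunF_eval_spec ls ls.length 0 ls.length [] [] (3 * ls.length) (by omega) (by omega) (by omega) (by omega)]
  obtain ⟨g, hg⟩ : ∃ g, 3 * ls.length - (3 * ls.length - 2) = g + 1 := ⟨3 * ls.length - (3 * ls.length - 2) - 1, by omega⟩
  rw [hg, pvRunF_nil]
  simp
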